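-- pv_equiv track=rewrite | github.com/AlexProsku/Py_alg | les_4/les_4_task_1.py | frqnc_4
-- ===== SOURCE A (Python) =====
-- def frqnc_4(min_range, max_range, min_multiple, max_multiple):
--     print_ = ''
--     num_multiple = min_multiple
--     while num_multiple <= max_multiple:
--         count_ = 0
--         num_range = min_range
--         while num_range <= max_range:
--             if num_range % num_multiple == 0:
--                 count_ += 1
--             num_range += 1
--         print_ += f'Числу {num_multiple} кратно {count_} число/ла/ел из диапазона {min_range} - {max_range}\n'
--         num_multiple += 1
--     return print_
-- ===== SOURCE B (Python) =====
-- def frqnc_4(min_range, max_range, min_multiple, max_multiple):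
--     lines = []
--     for m in range(min_multiple, max_multiple + 1):
--         if min_range <= max_range:
--             k = abs(m)
--             count_ = max_range // k - (min_range - 1) // k
--         else:
--             count_ = 0
--         lines.append(f'Числу {m} кратно {count_} число/ла/ел из диапазона {min_range} - {max_range}\n')
--     return ''.join(lines)
-- ===== Notes on version B (the rewrite author's own statement) =====
-- stated objective: alternative
-- what changed: B replaces A's inner scan over the whole range with the closed-form floor-division count max_range//|m| - (min_range-1)//|m| per multiplier, appending lines to a list joined once; this removes the O(range-width) inner loop (a timing run's inputs grow the multiplier count, where both are linear, so no speed-up was measured).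
import Mathlib
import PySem

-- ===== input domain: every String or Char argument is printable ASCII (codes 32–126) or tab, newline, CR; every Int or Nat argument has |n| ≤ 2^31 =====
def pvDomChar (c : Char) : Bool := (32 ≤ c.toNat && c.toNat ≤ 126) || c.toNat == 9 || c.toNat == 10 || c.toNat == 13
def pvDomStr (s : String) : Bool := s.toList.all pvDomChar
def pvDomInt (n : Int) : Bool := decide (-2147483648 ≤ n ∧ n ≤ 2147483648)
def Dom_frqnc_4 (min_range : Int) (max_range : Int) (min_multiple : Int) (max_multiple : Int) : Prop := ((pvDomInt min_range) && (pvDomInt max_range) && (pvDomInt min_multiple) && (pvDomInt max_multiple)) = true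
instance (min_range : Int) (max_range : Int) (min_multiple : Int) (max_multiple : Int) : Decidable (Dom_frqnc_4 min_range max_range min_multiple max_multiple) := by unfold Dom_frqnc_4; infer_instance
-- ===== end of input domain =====

-- B replaces A's inner per-element scan of the range with the closed-form
-- floor-division count max_range//|m| - (min_range-1)//|m| per multiplier.

-- ===== PORT A =====
-- inner while loop: num_range runs from min_range to max_range, counting multiples of m
def frqncInnerA (m : Int) (num_range : Int) (max_range : Int) (count_ : Int) : Int :=
  if _h : num_range ≤ max_range then
    frqncInnerA m (num_range + 1) max_range
      (if PySem.Int.mod num_range m = 0 then count_ + 1 else count_)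
  else count_
termination_by (max_range + 1 - num_range).toNat
decreasing_by omega

-- outer while loop: num_multiple runs from min_multiple to max_multiple, appending a line each turn
def frqncOuterA (min_range max_range : Int) (num_multiple max_multiple : Int) (print_ : String) : String :=
  if _h : num_multiple ≤ max_multiple then
    frqncOuterA min_range max_range (num_multiple + 1) max_multiple
      (print_ ++ "Числу " ++ PySem.Int.toStr num_multiple ++ " кратно " ++
        PySem.Int.toStr (frqncInnerA num_multiple min_range max_range 0) ++
        " число/ла/ел из диапазона " ++ PySem.Int.toStr min_range ++ " - " ++
        PySem.Int.toStr max_range ++ "\n")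
  else print_
termination_by (max_multiple + 1 - num_multiple).toNat
decreasing_by omega

def frqnc_4 (min_range : Int) (max_range : Int) (min_multiple : Int) (max_multiple : Int) : String :=
  frqncOuterA min_range max_range min_multiple max_multiple ""

-- ===== PORT B =====
def frqncLineB (min_range max_range : Int) (m : Int) : String :=
  let count_ : Int :=
    if min_range ≤ max_range then
      PySem.Int.floordiv max_range |m| - PySem.Int.floordiv (min_range - 1) |m|
    else 0
  "Числу " ++ PySem.Int.toStr m ++ " кратно " ++ PySem.Int.toStr count_ ++
    " число/ла/ел из диапазона " ++ PySem.Int.toStr min_range ++ " - " ++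
    PySem.Int.toStr max_range ++ "\n"

def frqnc_4_alt (min_range : Int) (max_range : Int) (min_multiple : Int) (max_multiple : Int) : String :=
  String.join ((PySem.List.pyRange min_multiple (max_multiple + 1) 1).map
    (frqncLineB min_range max_range))

-- ===== PRECONDITION & SPEC =====
-- Pre_ excludes exactly the inputs where A (and B) raise ZeroDivisionError:
-- multiplier 0 lies in [min_multiple, max_multiple] while the range is nonempty.
def Pre_frqnc_4 (min_range : Int) (max_range : Int) (min_multiple : Int) (max_multiple : Int) : Prop :=
  ¬ (min_range ≤ max_range ∧ min_multiple ≤ 0 ∧ 0 ≤ max_multiple)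
instance (min_range : Int) (max_range : Int) (min_multiple : Int) (max_multiple : Int) : Decidable (Pre_frqnc_4 min_range max_range min_multiple max_multiple) := by unfold Pre_frqnc_4; infer_instance

def pvWitness_frqnc_4 : Int × Int × Int × Int := (1, 10, 1, 5)

def Spec_frqnc_4 (min_range : Int) (max_range : Int) (min_multiple : Int) (max_multiple : Int) (out : String) : Prop := out = frqnc_4_alt min_range max_range min_multiple max_multiple
instance (min_range : Int) (max_range : Int) (min_multiple : Int) (max_multiple : Int) (out : String) : Decidable (Spec_frqnc_4 min_range max_range min_multiple max_multiple out) := by unfold Spec_frqnc_4; infer_instance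

-- ===== CLAIM (what is proved, stated in full; the proofs are below) =====
def Claim_equal_frqnc_4 : Prop := ∀ (min_range : Int) (max_range : Int) (min_multiple : Int) (max_multiple : Int), Dom_frqnc_4 min_range max_range min_multiple max_multiple → Pre_frqnc_4 min_range max_range min_multiple max_multiple → Spec_frqnc_4 min_range max_range min_multiple max_multiple (frqnc_4 min_range max_range min_multiple max_multiple)

-- ===== LEMMAS AND PROOFS =====

lemma str_foldl_append (l : List String) : ∀ (x y : String),
    l.foldl (· ++ ·) (x ++ y) = x ++ l.foldl (· ++ ·) y := by
  induction l with
  | nil => intro x y; rfl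
  | cons a t ih =>
    intro x y
    simp only [List.foldl_cons, String.append_assoc]
    exact ih x (y ++ a)

lemma str_join_cons (a : String) (l : List String) :
    String.join (a :: l) = a ++ String.join l := by
  show l.foldl (· ++ ·) ("" ++ a) = a ++ l.foldl (· ++ ·) ""
  have h1 : ("" ++ a : String) = a ++ "" := by simp
  rw [h1, str_foldl_append]

-- the telescoping step: for k > 0, a//k - (a-1)//k is 1 exactly at multiples of k
lemma floordiv_step (a k : Int) (hk : 0 < k) :
    PySem.Int.floordiv a k - PySem.Int.floordiv (a - 1) k
      = (if k ∣ a then 1 else 0) := by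
  have hqr := PySem.Int.floordiv_mul_add_mod a k
  have hr0 := PySem.Int.mod_nonneg a hk
  have hrk := PySem.Int.mod_lt a hk
  have hdvd := PySem.Int.mod_eq_zero_iff_dvd a k
  set q := PySem.Int.floordiv a k with hq
  set r := PySem.Int.mod a k with hr
  by_cases h : k ∣ a
  · have hr0' : r = 0 := hdvd.mpr h
    have hlow : (q - 1) * k = q * k - k := by ring
    have hhigh : (q - 1 + 1) * k = q * k := by ring
    have : PySem.Int.floordiv (a - 1) k = q - 1 := by
      rw [PySem.Int.floordiv_eq_iff_of_pos hk, hlow, hhigh]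
      omega
    simp [h, this]
  · have hr1 : 1 ≤ r := by
      rcases lt_or_eq_of_le hr0 with h1 | h1
      · omega
      · exact absurd (hdvd.mp h1.symm) h
    have hhigh : (q + 1) * k = q * k + k := by ring
    have : PySem.Int.floordiv (a - 1) k = q := by
      rw [PySem.Int.floordiv_eq_iff_of_pos hk, hhigh]
      omega
    simp [h, this]

-- A's inner loop computes the closed form (m ≠ 0)
lemma innerA_eq (m : Int) (hm : m ≠ 0) (b : Int) (a : Int) (ha : a ≤ b + 1) : ∀ (c : Int),
    frqncInnerA m a b c
      = c + (PySem.Int.floordiv b |m| - PySem.Int.floordiv (a - 1) |m|) := by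
  have hk : 0 < |m| := abs_pos.mpr hm
  induction a, ha using Int.le_induction_down with
  | base =>
    intro c
    rw [frqncInnerA]
    simp only [show ¬(b + 1 ≤ b) by omega, dite_false]
    have hfix : b + 1 - 1 = b := by ring
    rw [hfix]
    omega
  | pred a ha ih =>
    intro c
    rw [frqncInnerA]
    simp only [show a - 1 ≤ b by omega, dite_true]
    have hfix : a - 1 + 1 = a := by ring
    rw [hfix, ih]
    have hstep := floordiv_step (a - 1) |m| hk
    have hcond : (PySem.Int.mod (a - 1) m = 0) ↔ |m| ∣ (a - 1) := by
      rw [PySem.Int.mod_eq_zero_iff_dvd, abs_dvd]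
    by_cases h : |m| ∣ (a - 1)
    · rw [if_pos (hcond.mpr h)]
      rw [if_pos h] at hstep
      omega
    · rw [if_neg (fun hc => h (hcond.mp hc))]
      rw [if_neg h] at hstep
      omega

-- A's outer loop equals B's map-and-join, given every visited multiplier is nonzero
-- whenever the range is nonempty
lemma outer_eq_aux (min_range max_range max_multiple : Int) (nm : Int) (hnm : nm ≤ max_multiple + 1) :
    (∀ m : Int, nm ≤ m → m ≤ max_multiple → min_range ≤ max_range → m ≠ 0) →
    ∀ (s : String),
    frqncOuterA min_range max_range nm max_multiple s
      = s ++ String.join ((PySem.List.pyRange nm (max_multiple + 1) 1).map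
          (frqncLineB min_range max_range)) := by
  induction nm, hnm using Int.le_induction_down with
  | base =>
    intro _ s
    rw [frqncOuterA]
    simp [PySem.List.pyRange_one_eq_nil (by omega : max_multiple + 1 ≤ max_multiple + 1),
      String.join]
  | pred nm hnm ih =>
    intro H s
    rw [frqncOuterA]
    simp only [show nm - 1 ≤ max_multiple by omega, dite_true]
    have hfix : nm - 1 + 1 = nm := by ring
    rw [hfix, ih (fun m h1 h2 h3 => H m (by omega) h2 h3),
        PySem.List.pyRange_one_cons (by omega : nm - 1 < max_multiple + 1),
        List.map_cons, str_join_cons]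
    have hcount : frqncInnerA (nm - 1) min_range max_range 0
        = (if min_range ≤ max_range then
            PySem.Int.floordiv max_range |nm - 1| - PySem.Int.floordiv (min_range - 1) |nm - 1|
          else 0) := by
      by_cases hr : min_range ≤ max_range
      · have hmne : (nm - 1) ≠ 0 := H (nm - 1) le_rfl (by omega) hr
        rw [innerA_eq _ hmne _ _ (by omega), if_pos hr]
        ring
      · rw [frqncInnerA, if_neg hr]
        simp only [hr, dite_false]
    simp only [frqncLineB, hcount, String.append_assoc, hfix]

lemma outer_eq (min_range max_range max_multiple : Int) (nm : Int)
    (H : ∀ m : Int, nm ≤ m → m ≤ max_multiple → min_range ≤ max_range → m ≠ 0)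
    (s : String) :
    frqncOuterA min_range max_range nm max_multiple s
      = s ++ String.join ((PySem.List.pyRange nm (max_multiple + 1) 1).map
          (frqncLineB min_range max_range)) := by
  by_cases hnm : nm ≤ max_multiple + 1
  · exact outer_eq_aux min_range max_range max_multiple nm hnm H s
  · rw [frqncOuterA]
    simp [show ¬ nm ≤ max_multiple by omega,
      PySem.List.pyRange_one_eq_nil (by omega : max_multiple + 1 ≤ nm), String.join]

-- ===== VERDICT (by name: the statement is the Claim_ definition above) =====
theorem frqnc_4_spec : Claim_equal_frqnc_4 := by
  intro a b c d _ hpre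
  unfold Spec_frqnc_4 frqnc_4 frqnc_4_alt
  rw [outer_eq a b d c
    (fun m h1 h2 h3 => by
      unfold Pre_frqnc_4 at hpre
      intro h0
      exact hpre ⟨h3, by omega, by omega⟩) ""]
  simp
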